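-- pv_equiv track=rewrite | github.com/AkiroKazuki/BISINDO | src/models/tcn.py | _compute_receptive_field
-- ===== SOURCE A (Python) =====
-- def _compute_receptive_field(
--
--     num_layers: int,
--     kernel_size: int
-- ) -> int:
--     """Compute the receptive field size."""
--     rf = 1
--     for i in range(num_layers):
--         dilation = 2 ** i
--         rf += 2 * (kernel_size - 1) * dilation
--     return rf
-- ===== SOURCE B (Python) =====
-- def _compute_receptive_field(
--
--     num_layers: int,
--     kernel_size: int
-- ) -> int:
--     """Compute the receptive field size via the doubling recurrence
--     rf(n) = 2*rf(n-1) + 2*kernel_size - 3, rf(0) = 1 (no powers of 2 needed)."""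
--     rf = 1
--     n = num_layers
--     while n > 0:
--         rf = 2 * rf + 2 * kernel_size - 3
--         n -= 1
--     return rf
-- ===== Notes on version B (the rewrite author's own statement) =====
-- stated objective: alternative
-- what changed: Replaces the loop that computes a fresh dilation 2**i each iteration and accumulates 2*(kernel_size-1)*dilation with a doubling recurrence rf = 2*rf + 2*kernel_size - 3 applied num_layers times, so no power of two is ever computed.
import Mathlib
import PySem

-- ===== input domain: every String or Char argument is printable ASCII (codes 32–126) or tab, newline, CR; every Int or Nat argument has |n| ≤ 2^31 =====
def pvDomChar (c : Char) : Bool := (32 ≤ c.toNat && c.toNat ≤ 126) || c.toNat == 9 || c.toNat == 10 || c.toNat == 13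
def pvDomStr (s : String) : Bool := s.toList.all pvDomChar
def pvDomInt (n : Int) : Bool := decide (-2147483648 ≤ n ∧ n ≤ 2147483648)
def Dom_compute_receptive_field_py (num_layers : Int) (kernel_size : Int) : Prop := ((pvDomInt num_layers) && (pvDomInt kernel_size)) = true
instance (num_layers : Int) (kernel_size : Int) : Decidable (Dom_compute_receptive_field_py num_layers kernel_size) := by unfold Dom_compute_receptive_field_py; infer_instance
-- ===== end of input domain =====

-- B replaces A's per-layer power-of-two accumulation with a doubling recurrence rf = 2*rf + 2*k - 3; objective: alternative.


-- ===== PORT A =====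
-- exact port of Python's 2 ** i for i ≥ 0 (structural recursion; avoids slow kernel npow)
def pvPow2 : Nat → Int
  | 0 => 1
  | n + 1 => 2 * pvPow2 n

def compute_receptive_field_py (num_layers : Int) (kernel_size : Int) : Int :=
  (PySem.List.pyRange 0 num_layers 1).foldl
    (fun rf i => rf + 2 * (kernel_size - 1) * (pvPow2 i.toNat)) 1

-- ===== PORT B =====
-- the while-loop of Source B: it runs num_layers.toNat times (n > 0 is checked before each step)
def crf_alt_loop (kernel_size : Int) (rf : Int) : Nat → Int
  | 0 => rf
  | n + 1 => crf_alt_loop kernel_size (2 * rf + 2 * kernel_size - 3) n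

def compute_receptive_field_py_alt (num_layers : Int) (kernel_size : Int) : Int :=
  crf_alt_loop kernel_size 1 num_layers.toNat

-- ===== PRECONDITION & SPEC =====
def Spec_compute_receptive_field_py (num_layers : Int) (kernel_size : Int) (out : Int) : Prop := out = compute_receptive_field_py_alt num_layers kernel_size
instance (num_layers : Int) (kernel_size : Int) (out : Int) : Decidable (Spec_compute_receptive_field_py num_layers kernel_size out) := by unfold Spec_compute_receptive_field_py; infer_instance

-- ===== CLAIM =====
def Claim_equal_compute_receptive_field_py : Prop := ∀ (num_layers : Int) (kernel_size : Int), Dom_compute_receptive_field_py num_layers kernel_size → Spec_compute_receptive_field_py num_layers kernel_size (compute_receptive_field_py num_layers kernel_size)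

-- ===== LEMMAS AND PROOFS =====

-- A's fold over range n equals the closed form 1 + 2*(k-1)*(2^n - 1)
lemma crf_fold_range (k : Int) (n : Nat) :
    ((List.range n).map (fun j : Nat => (0 : Int) + j)).foldl
      (fun rf i => rf + 2 * (k - 1) * (pvPow2 i.toNat)) 1
      = 1 + 2 * (k - 1) * (pvPow2 n - 1) := by
  induction n with
  | zero => simp [pvPow2]
  | succ m ih =>
    rw [List.range_succ, List.map_append, List.foldl_append, ih]
    simp only [List.map_cons, List.map_nil, List.foldl_cons, List.foldl_nil]
    have h : ((0 : Int) + (m : Int)).toNat = m := by omega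
    rw [h, show pvPow2 (m + 1) = 2 * pvPow2 m from rfl]
    ring

-- one more iteration of B's loop is the recurrence applied to the result
lemma crf_alt_loop_succ (k rf : Int) (n : Nat) :
    crf_alt_loop k rf (n + 1) = 2 * crf_alt_loop k rf n + 2 * k - 3 := by
  induction n generalizing rf with
  | zero => rfl
  | succ m ih =>
    rw [show crf_alt_loop k rf (m + 1 + 1)
          = crf_alt_loop k (2 * rf + 2 * k - 3) (m + 1) from rfl, ih]
    rfl

-- B's loop from 1 also equals the closed form
lemma crf_alt_loop_closed (k : Int) (n : Nat) :
    crf_alt_loop k 1 n = 1 + 2 * (k - 1) * (pvPow2 n - 1) := by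
  induction n with
  | zero => simp [crf_alt_loop, pvPow2]
  | succ m ih =>
    rw [crf_alt_loop_succ, ih, show pvPow2 (m + 1) = 2 * pvPow2 m from rfl]
    ring

-- ===== VERDICT =====
theorem compute_receptive_field_py_spec : Claim_equal_compute_receptive_field_py := by
  intro n k _
  unfold Spec_compute_receptive_field_py compute_receptive_field_py compute_receptive_field_py_alt
  rw [PySem.List.pyRange_one]
  have h : (n - 0).toNat = n.toNat := by omega
  rw [h, crf_fold_range, crf_alt_loop_closed]
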